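-- pv_equiv track=rewrite | github.com/nstalways/Algorithm-Questions | 02_Brute_Force/BOJ_1120.py | solution
-- ===== SOURCE A (Python) =====
-- def solution(a, b):
--     len_a, len_b = len(a), len(b)
--     offset = len_b - len_a
--     ans = float('inf')
--
--     for b_start in range(offset + 1):
--         part_of_b = b[b_start:b_start + len_a]
--         diff = 0
--         for ch_a, ch_b in zip(a, part_of_b):
--             if ch_a != ch_b:
--                 diff += 1
--
--         ans = min(ans, diff)
--
--     return ans
-- ===== SOURCE B (Python) =====
-- def solution(a, b):
--     offset = len(b) - len(a)
--     diffs = [0] * (offset + 1)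
--     for i, ch in enumerate(a):
--         diffs = [d + (ch != b[j + i]) for j, d in enumerate(diffs)]
--     return min(diffs)
-- ===== Notes on version B (the rewrite author's own statement) =====
-- stated objective: alternative
-- what changed: Loops are transposed: instead of computing each window's Hamming distance independently over slices of b, B keeps one array of per-window mismatch counts and, for each character of a, adds its mismatch contribution to every window's counter at once, taking min at the end.
-- outside the precondition, e.g. on solution('ab', 'a'): A returns inf, B raises ValueError
import Mathlib
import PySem

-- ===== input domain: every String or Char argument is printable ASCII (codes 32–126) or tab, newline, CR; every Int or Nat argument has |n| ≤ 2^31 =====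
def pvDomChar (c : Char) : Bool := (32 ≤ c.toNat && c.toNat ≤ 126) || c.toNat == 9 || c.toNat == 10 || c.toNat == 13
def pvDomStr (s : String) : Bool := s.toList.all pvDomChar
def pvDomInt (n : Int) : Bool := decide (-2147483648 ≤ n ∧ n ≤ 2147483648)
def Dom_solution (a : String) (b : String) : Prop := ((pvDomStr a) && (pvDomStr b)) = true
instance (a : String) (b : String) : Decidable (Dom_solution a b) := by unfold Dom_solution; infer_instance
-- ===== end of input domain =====

-- B transposes A's two loops (one shared per-window counter array, updated column by column);
-- equal return values on all inputs with len(a) ≤ len(b) (neither version mutates its arguments).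

-- ===== PORT A =====
def solution (a : String) (b : String) : Int :=
  let A := a.toList
  let B := b.toList
  let lenA : Int := A.length
  let lenB : Int := B.length
  let offset : Int := lenB - lenA
  -- ans = float('inf'); for b_start in range(offset+1): …  (ans modelled as Option Int, none = inf)
  let ans : Option Int := (PySem.List.pyRange 0 (offset + 1)).foldl
    (fun ans bStart =>
      let part := PySem.List.slice B (some bStart) (some (bStart + lenA))
      let diff : Int := (A.zip part).foldl (fun d p => if p.1 ≠ p.2 then d + 1 else d) 0
      some (match ans with | none => diff | some v => min v diff)) none
  ans.getD 0  -- Python returns float('inf') when the loop never ran (len(a) > len(b)); outside Pre_solution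

-- ===== PORT B =====
def solution_alt (a : String) (b : String) : Int :=
  let A := a.toList
  let B := b.toList
  let offset : Int := (B.length : Int) - (A.length : Int)
  let diffs0 : List Int := List.replicate (offset + 1).toNat 0
  let diffs := (PySem.List.enumerate A).foldl
    (fun ds ic =>
      (PySem.List.enumerate ds).map (fun jd =>
        jd.2 + (if PySem.List.pyGet? B (jd.1 + ic.1) ≠ some ic.2 then (1 : Int) else 0)))
    diffs0
  (PySem.List.min? diffs (fun x => x)).getD 0  -- Python's min([]) raises ValueError (len(a) > len(b)); outside Pre_solution

-- ===== PRECONDITION & SPEC =====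
-- Pre_ excludes len(a) > len(b): there A returns float('inf'), which is not an Int, and B raises ValueError.
def Pre_solution (a : String) (b : String) : Prop := a.toList.length ≤ b.toList.length
instance (a : String) (b : String) : Decidable (Pre_solution a b) := by unfold Pre_solution; infer_instance
def pvWitness_solution : String × String := ("ab", "cabd")
def Spec_solution (a : String) (b : String) (out : Int) : Prop := out = solution_alt a b
instance (a : String) (b : String) (out : Int) : Decidable (Spec_solution a b out) := by unfold Spec_solution; infer_instance

-- ===== CLAIM (what is proved, stated in full; the proofs are below) =====
def Claim_equal_solution : Prop := ∀ (a : String) (b : String), Dom_solution a b → Pre_solution a b → Spec_solution a b (solution a b)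

-- ===== LEMMAS AND PROOFS =====

-- the Hamming distance of a against the window of b starting at j (the common value both ports compute per window)
def pvW (A B : List Char) (j : Nat) : Int :=
  ((A.zip (B.drop j)).countP (fun p => decide (p.1 ≠ p.2)) : Int)

theorem pv_zip_take_self {α β : Type} (l : List α) (l' : List β) :
    l.zip (l'.take l.length) = l.zip l' := by
  induction l generalizing l' with
  | nil => rfl
  | cons x t ih => cases l' with
    | nil => rfl
    | cons y t' => simp [List.zip_cons_cons, ih]

theorem pv_foldl_optmin {α : Type} (f : α → Int) (l : List α) (v : Int) :
    l.foldl (fun ans j => some (match ans with | none => f j | some w => min w (f j))) (some v)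
      = some (l.foldl (fun w j => min w (f j)) v) := by
  induction l generalizing v with
  | nil => rfl
  | cons x t ih => simp [List.foldl_cons, ih]

theorem pv_stepmap (G : Int → Int) (k : Nat) :
    ∀ (s : Int) (h : Nat → Int),
      (PySem.List.enumerate ((List.range k).map h) s).map (fun jd => jd.2 + G jd.1)
        = (List.range k).map (fun j => h j + G (s + j)) := by
  induction k with
  | zero => intro s h; rfl
  | succ k ih =>
    intro s h
    rw [List.range_succ_eq_map]
    simp only [List.map_cons, PySem.List.enumerate]
    rw [List.map_map, ih (s + 1) (h ∘ Nat.succ)]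
    simp only [List.map_map, Function.comp]
    refine congrArg₂ _ (by push_cast; ring_nf) ?_
    apply List.map_congr_left
    intro j _
    simp only [Function.comp_apply]
    push_cast; ring_nf

theorem pv_outer (g : Int × Char → Int → Int) (t : List (Int × Char)) :
    ∀ (k : Nat) (h : Nat → Int),
      t.foldl (fun ds ic => (PySem.List.enumerate ds).map (fun jd => jd.2 + g ic jd.1))
        ((List.range k).map h)
        = (List.range k).map (fun j => h j + (t.map (fun ic => g ic j)).sum) := by
  induction t with
  | nil => intro k h; simp
  | cons ic t ih =>
    intro k h
    rw [List.foldl_cons, pv_stepmap (g ic) k 0 h]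
    simp only [zero_add]
    rw [ih k (fun j => h j + g ic (j : Int))]
    apply List.map_congr_left
    intro j _
    simp only [List.map_cons, List.sum_cons]
    ring

theorem pv_S_eq (B : List Char) (t : List Char) :
    ∀ (s j : Nat), j + s + t.length ≤ B.length →
      ((PySem.List.enumerate t (s : Int)).map
          (fun ic => if PySem.List.pyGet? B ((j : Int) + ic.1) ≠ some ic.2 then (1 : Int) else 0)).sum
        = ((t.zip (B.drop (j + s))).countP (fun p => decide (p.1 ≠ p.2)) : Int) := by
  induction t with
  | nil => intro s j _; simp
  | cons c t ih =>
    intro s j hle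
    have hlt : j + s < B.length := by simp at hle; omega
    have hget : PySem.List.pyGet? B ((j : Int) + (s : Int)) = some (B[j + s]) := by
      have : ((j : Int) + (s : Int)) = ((j + s : Nat) : Int) := by push_cast; ring
      rw [this, PySem.List.pyGet?_natCast]
      simp [List.getElem?_eq_getElem hlt]
    have hs1 : ((s : Int) + 1) = ((s + 1 : Nat) : Int) := by push_cast; ring
    have hdrop : B.drop (j + s) = B[j + s] :: B.drop (j + s + 1) :=
      (List.getElem_cons_drop hlt).symm
    simp only [PySem.List.enumerate, List.map_cons, List.sum_cons, hget, hs1]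
    rw [ih (s + 1) j (by simp at hle ⊢; omega)]
    rw [hdrop, show j + (s + 1) = j + s + 1 from rfl]
    simp only [List.zip_cons_cons, List.countP_cons]
    by_cases hcc : c = B[j + s]
    · simp [hcc]
    · have hcc' : B[j + s] ≠ c := fun h => hcc h.symm
      simp [hcc, hcc']
      ring

theorem pv_A_eq (a b : String) (k' : Nat) (hk : b.toList.length = a.toList.length + k') :
    solution a b = (List.range k').foldl
      (fun w j => min w (pvW a.toList b.toList (Nat.succ j))) (pvW a.toList b.toList 0) := by
  unfold solution
  dsimp only
  have h1 : (b.toList.length : Int) - (a.toList.length : Int) + 1 = ((k' + 1 : Nat) : Int) := by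
    rw [hk]; push_cast; ring
  rw [h1, PySem.List.pyRange_zero_natCast, List.foldl_map]
  have hbody : ∀ (j : Nat),
      (a.toList.zip (PySem.List.slice b.toList (some (j : Int)) (some ((j : Int) + (a.toList.length : Int))))).foldl
        (fun d p => if p.1 ≠ p.2 then d + 1 else d) (0 : Int) = pvW a.toList b.toList j := by
    intro j
    have h2 : ((j : Int) + (a.toList.length : Int)) = ((j + a.toList.length : Nat) : Int) := by
      push_cast; ring
    rw [h2, PySem.List.slice_natCast, Nat.add_sub_cancel_left, pv_zip_take_self,
      PySem.List.foldl_ite_add_one (fun (p : Char × Char) => p.1 ≠ p.2)]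
    simp [pvW]
  simp only [hbody]
  rw [List.range_succ_eq_map, List.foldl_cons, List.foldl_map]
  rw [pv_foldl_optmin (fun j => pvW a.toList b.toList (Nat.succ j))]
  rfl

theorem pv_B_eq (a b : String) (k' : Nat) (hk : b.toList.length = a.toList.length + k') :
    solution_alt a b = (List.range k').foldl
      (fun w j => min w (pvW a.toList b.toList (Nat.succ j))) (pvW a.toList b.toList 0) := by
  unfold solution_alt
  dsimp only
  have h1 : (b.toList.length : Int) - (a.toList.length : Int) + 1 = ((k' + 1 : Nat) : Int) := by
    rw [hk]; push_cast; ring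
  rw [h1, Int.toNat_natCast]
  have hrep : List.replicate (k' + 1) (0 : Int) = (List.range (k' + 1)).map (fun _ => (0 : Int)) := by
    simp
  rw [hrep]
  rw [pv_outer (fun ic z => if PySem.List.pyGet? b.toList (z + ic.1) ≠ some ic.2 then (1 : Int) else 0)
      (PySem.List.enumerate a.toList) (k' + 1) (fun _ => (0 : Int))]
  have hmap : ∀ (j : Nat), j ∈ List.range (k' + 1) →
      (0 : Int) + ((PySem.List.enumerate a.toList).map
        (fun ic => if PySem.List.pyGet? b.toList ((j : Int) + ic.1) ≠ some ic.2 then (1 : Int) else 0)).sum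
      = pvW a.toList b.toList j := by
    intro j hj
    have hj' : j ≤ k' := by
      have := List.mem_range.mp hj; omega
    have hS := pv_S_eq b.toList a.toList 0 j (by omega)
    rw [Nat.cast_zero] at hS
    rw [zero_add, hS]
    simp [pvW]
  rw [List.map_congr_left hmap]
  rw [List.range_succ_eq_map, List.map_cons, List.map_map,
    PySem.List.min?_id_cons, List.foldl_map]
  rfl

-- ===== VERDICT (by name: the statement is the Claim_ definition above) =====
theorem solution_spec : Claim_equal_solution := by
  intro a b _ hpre
  unfold Pre_solution at hpre
  obtain ⟨k', hk⟩ : ∃ k', b.toList.length = a.toList.length + k' :=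
    ⟨b.toList.length - a.toList.length, by omega⟩
  unfold Spec_solution
  rw [pv_A_eq a b k' hk, pv_B_eq a b k' hk]
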